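-- pv_equiv track=rewrite | github.com/ody1205/Daily-Coding | Programmers/skill_tests/lvl1/skill_test_3.py | solution
-- ===== SOURCE A (Python) =====
-- def solution(n):
--     answer = 0
--     a = []
--     for i in range(2,n+1):
--         if i == 2:
--             answer += 1
--             a.append(i)
--         if i == 3:
--             answer += 1
--             a.append(i)
--         if i % 2 != 0 and i % 3 != 0:
--             answer += 1
--             a.append(i)
--     return a
-- ===== SOURCE B (Python) =====
-- def solution(n):
--     # Emit 2 and 3 directly, then generate the numbers coprime to 6 (≡ 5, 1 mod 6)
--     # by stepping through every 6th integer from 5, instead of filtering each integer.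
--     a = []
--     if n >= 2:
--         a.append(2)
--     if n >= 3:
--         a.append(3)
--     for i in range(5, n + 1, 6):
--         a.append(i)
--         if i + 2 <= n:
--             a.append(i + 2)
--     return a
-- ===== Notes on version B (the rewrite author's own statement) =====
-- stated objective: faster
-- what changed: Instead of scanning every integer from 2 to n and testing divisibility by 2 and 3, B appends 2 and 3 directly and generates the remaining values (those congruent to 5 or 1 mod 6) by stepping 6 at a time from 5, appending i and i+2 per step.
import Mathlib
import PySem

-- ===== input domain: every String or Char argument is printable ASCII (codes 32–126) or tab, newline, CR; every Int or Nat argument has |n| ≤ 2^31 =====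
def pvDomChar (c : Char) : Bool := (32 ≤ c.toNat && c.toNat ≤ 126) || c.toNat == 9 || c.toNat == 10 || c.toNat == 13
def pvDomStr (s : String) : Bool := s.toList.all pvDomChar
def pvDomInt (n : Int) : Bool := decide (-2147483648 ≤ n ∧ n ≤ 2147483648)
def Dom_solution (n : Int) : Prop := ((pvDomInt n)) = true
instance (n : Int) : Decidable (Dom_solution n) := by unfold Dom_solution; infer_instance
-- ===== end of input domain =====

-- B replaces A's divisibility scan of every integer with direct step-6 generation of the ≡5,1 (mod 6) values (faster by a constant factor).

-- ===== PORT A =====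
def solution (n : Int) : List Int :=
  ((PySem.List.pyRange 2 (n+1) 1).foldl
    (fun s i =>
      let s1 := if i = 2 then (s.1 + 1, s.2 ++ [i]) else s
      let s2 := if i = 3 then (s1.1 + 1, s1.2 ++ [i]) else s1
      if PySem.Int.mod i 2 ≠ 0 ∧ PySem.Int.mod i 3 ≠ 0 then (s2.1 + 1, s2.2 ++ [i]) else s2)
    ((0 : Int), ([] : List Int))).2

-- ===== PORT B =====
def solution_alt (n : Int) : List Int :=
  let a0 : List Int := []
  let a1 := if 2 ≤ n then a0 ++ [2] else a0
  let a2 := if 3 ≤ n then a1 ++ [3] else a1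
  (PySem.List.pyRange 5 (n+1) 6).foldl
    (fun a i =>
      let a' := a ++ [i]
      if i + 2 ≤ n then a' ++ [i + 2] else a') a2

-- ===== PRECONDITION & SPEC =====
def Spec_solution (n : Int) (out : List Int) : Prop := out = solution_alt n
instance (n : Int) (out : List Int) : Decidable (Spec_solution n out) := by unfold Spec_solution; infer_instance

-- ===== CLAIM (what is proved, stated in full; the proofs are below) =====
def Claim_equal_solution : Prop := ∀ (n : Int), Dom_solution n → Spec_solution n (solution n)

-- ===== LEMMAS AND PROOFS =====

/-- what A's loop body appends for element `i` -/
def hA (i : Int) : List Int :=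
  (if i = 2 then [i] else []) ++ (if i = 3 then [i] else []) ++
    (if PySem.Int.mod i 2 ≠ 0 ∧ PySem.Int.mod i 3 ≠ 0 then [i] else [])

/-- what B's loop body appends for element `i` -/
def fB (n i : Int) : List Int := [i] ++ (if i + 2 ≤ n then [i + 2] else [])

/-- B's prefix -/
def preB (n : Int) : List Int := (if 2 ≤ n then [(2:Int)] else []) ++ (if 3 ≤ n then [(3:Int)] else [])

lemma foldlA_snd (l : List Int) (ans : Int) (a : List Int) :
    (l.foldl
      (fun s i =>
        let s1 := if i = 2 then (s.1 + 1, s.2 ++ [i]) else s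
        let s2 := if i = 3 then (s1.1 + 1, s1.2 ++ [i]) else s1
        if PySem.Int.mod i 2 ≠ 0 ∧ PySem.Int.mod i 3 ≠ 0 then (s2.1 + 1, s2.2 ++ [i]) else s2)
      (ans, a)).2 = a ++ l.flatMap hA := by
  induction l generalizing ans a with
  | nil => simp
  | cons i l ih =>
    simp only [List.foldl_cons, List.flatMap_cons]
    split_ifs with h1 h2 h3 <;> simp_all [hA, List.append_assoc]

lemma A_eq (n : Int) : solution n = (PySem.List.pyRange 2 (n+1) 1).flatMap hA := by
  unfold solution
  rw [foldlA_snd]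
  simp

lemma B_eq (n : Int) :
    solution_alt n = preB n ++ (PySem.List.pyRange 5 (n+1) 6).flatMap (fB n) := by
  unfold solution_alt
  dsimp only
  have hbody : (fun (a : List Int) (i : Int) => if i + 2 ≤ n then a ++ [i] ++ [i + 2] else a ++ [i])
      = fun (a : List Int) (i : Int) => a ++ fB n i := by
    funext a i
    simp only [fB]
    split_ifs <;> simp
  rw [hbody, PySem.List.foldl_append_eq_flatMap]
  unfold preB
  split_ifs <;> simp

lemma pyRange6_nil (a b : Int) (h : b ≤ a) : PySem.List.pyRange a b 6 = [] := by
  rw [PySem.List.pyRange_of_pos _ _ (by norm_num), if_neg (by omega)]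
  simp

lemma pyRange6_cons (a b : Int) (h : a < b) :
    PySem.List.pyRange a b 6 = a :: PySem.List.pyRange (a+6) b 6 := by
  rw [PySem.List.pyRange_of_pos _ _ (by norm_num),
      PySem.List.pyRange_of_pos _ _ (by norm_num), if_pos h]
  have hk : ((b - a + 6 - 1) / 6).toNat
      = (if a + 6 < b then ((b - (a + 6) + 6 - 1) / 6).toNat else 0) + 1 := by
    split_ifs <;> omega
  rw [hk, List.range_succ_eq_map]
  simp only [List.map_cons, List.map_map]
  congr 1
  · simp
  · apply List.map_congr_left
    intro k _
    simp only [Function.comp]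
    push_cast
    ring

lemma rangeExplicit (a : Int) (m : Nat) :
    PySem.List.pyRange a (a + m) 1 = (List.range m).map (fun k : Nat => a + (k : Int)) := by
  rw [PySem.List.pyRange_one]
  have h : (a + (m : Int) - a).toNat = m := by omega
  rw [h]

lemma hA_one (i : Int) (h5 : 5 ≤ i) (h : i % 6 = 1 ∨ i % 6 = 5) : hA i = [i] := by
  unfold hA
  simp only [PySem.Int.mod_eq_emod_of_pos (show (0:Int) < 2 by norm_num),
    PySem.Int.mod_eq_emod_of_pos (show (0:Int) < 3 by norm_num)]
  rw [if_neg (by omega), if_neg (by omega), if_pos (by omega)]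
  simp

lemma hA_zero (i : Int) (h5 : 5 ≤ i) (h : ¬(i % 6 = 1 ∨ i % 6 = 5)) : hA i = [] := by
  unfold hA
  simp only [PySem.Int.mod_eq_emod_of_pos (show (0:Int) < 2 by norm_num),
    PySem.Int.mod_eq_emod_of_pos (show (0:Int) < 3 by norm_num)]
  rw [if_neg (by omega), if_neg (by omega), if_neg (by omega)]
  simp

lemma blocks : ∀ (k : Nat) (a n : Int), (n + 1 - a).toNat ≤ k → a % 6 = 5 → 5 ≤ a →
    (PySem.List.pyRange a (n+1) 1).flatMap hA
      = (PySem.List.pyRange a (n+1) 6).flatMap (fB n) := by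
  intro k
  induction k with
  | zero =>
    intro a n hk _ _
    rw [PySem.List.pyRange_one_eq_nil (by omega), pyRange6_nil _ _ (by omega)]
    simp
  | succ k ih =>
    intro a n hk ha h5
    by_cases hab : n + 1 ≤ a
    · rw [PySem.List.pyRange_one_eq_nil (by omega), pyRange6_nil _ _ (by omega)]
      simp
    · by_cases hfull : a + 6 ≤ n + 1
      · -- a full block [a, a+5]
        rw [PySem.List.pyRange_one_append a (a+6) (n+1) (by omega) (by omega),
            List.flatMap_append]
        have hblk : PySem.List.pyRange a (a + 6) 1 = [a, a+1, a+2, a+3, a+4, a+5] := by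
          have := rangeExplicit a 6
          simp only [Nat.cast_ofNat] at this
          rw [this]
          simp [List.range_succ]
        rw [hblk, pyRange6_cons _ _ (by omega), List.flatMap_cons]
        simp only [List.flatMap_cons, List.flatMap_nil]
        rw [hA_one a h5 (by omega), hA_zero (a+1) (by omega) (by omega),
            hA_one (a+2) (by omega) (by omega), hA_zero (a+3) (by omega) (by omega),
            hA_zero (a+4) (by omega) (by omega), hA_zero (a+5) (by omega) (by omega),
            ih (a+6) n (by omega) (by omega) (by omega)]
        simp [fB, if_pos (show a + 2 ≤ n by omega)]
      · -- partial final block: a ≤ n < a + 5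
        rw [pyRange6_cons _ _ (by omega), pyRange6_nil (a+6) (n+1) (by omega)]
        simp only [List.flatMap_cons, List.flatMap_nil, List.append_nil]
        have hd : n = a ∨ n = a + 1 ∨ n = a + 2 ∨ n = a + 3 ∨ n = a + 4 := by omega
        rcases hd with h | h | h | h | h <;> rw [h]
        · have hblk : PySem.List.pyRange a (a + 1) 1 = [a] :=
            PySem.List.pyRange_one_singleton a
          rw [hblk]
          simp only [List.flatMap_cons, List.flatMap_nil]
          rw [hA_one a h5 (by omega)]
          simp [fB, show ¬ a + 2 ≤ a by omega]
        · have hblk : PySem.List.pyRange a (a + 2) 1 = [a, a + 1] := by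
            have h2 := rangeExplicit a 2
            simp only [Nat.cast_ofNat] at h2
            rw [h2]
            simp [List.range_succ]
          rw [show a + 1 + 1 = a + (2:Int) by ring, hblk]
          simp only [List.flatMap_cons, List.flatMap_nil]
          rw [hA_one a h5 (by omega), hA_zero (a+1) (by omega) (by omega)]
          simp [fB, show ¬ a + 2 ≤ a + 1 by omega]
        · have hblk : PySem.List.pyRange a (a + 3) 1 = [a, a + 1, a + 2] := by
            have h2 := rangeExplicit a 3
            simp only [Nat.cast_ofNat] at h2
            rw [h2]
            simp [List.range_succ]
          rw [show a + 2 + 1 = a + (3:Int) by ring, hblk]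
          simp only [List.flatMap_cons, List.flatMap_nil]
          rw [hA_one a h5 (by omega), hA_zero (a+1) (by omega) (by omega),
              hA_one (a+2) (by omega) (by omega)]
          simp [fB]
        · have hblk : PySem.List.pyRange a (a + 4) 1 = [a, a + 1, a + 2, a + 3] := by
            have h2 := rangeExplicit a 4
            simp only [Nat.cast_ofNat] at h2
            rw [h2]
            simp [List.range_succ]
          rw [show a + 3 + 1 = a + (4:Int) by ring, hblk]
          simp only [List.flatMap_cons, List.flatMap_nil]
          rw [hA_one a h5 (by omega), hA_zero (a+1) (by omega) (by omega),
              hA_one (a+2) (by omega) (by omega), hA_zero (a+3) (by omega) (by omega)]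
          simp [fB, show a + 2 ≤ a + 3 by omega]
        · have hblk : PySem.List.pyRange a (a + 5) 1 = [a, a + 1, a + 2, a + 3, a + 4] := by
            have h2 := rangeExplicit a 5
            simp only [Nat.cast_ofNat] at h2
            rw [h2]
            simp [List.range_succ]
          rw [show a + 4 + 1 = a + (5:Int) by ring, hblk]
          simp only [List.flatMap_cons, List.flatMap_nil]
          rw [hA_one a h5 (by omega), hA_zero (a+1) (by omega) (by omega),
              hA_one (a+2) (by omega) (by omega), hA_zero (a+3) (by omega) (by omega),
              hA_zero (a+4) (by omega) (by omega)]
          simp [fB, show a + 2 ≤ a + 4 by omega]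

lemma main_eq (n : Int) : solution n = solution_alt n := by
  rw [A_eq, B_eq]
  by_cases h5 : 5 ≤ n
  · rw [PySem.List.pyRange_one_append 2 5 (n+1) (by omega) (by omega), List.flatMap_append]
    have h25 : PySem.List.pyRange 2 5 1 = [2, 3, 4] := by decide
    rw [h25, blocks (n + 1 - 5).toNat 5 n (by omega) (by norm_num) (by norm_num)]
    simp only [List.flatMap_cons, List.flatMap_nil]
    have h2 : hA 2 = [2] := by decide
    have h3 : hA 3 = [3] := by decide
    have h4 : hA 4 = [] := by decide
    rw [h2, h3, h4]
    unfold preB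
    rw [if_pos (by omega), if_pos (by omega)]
    simp
  · by_cases h2 : n < 2
    · rw [PySem.List.pyRange_one_eq_nil (by omega), pyRange6_nil 5 (n+1) (by omega)]
      unfold preB
      rw [if_neg (by omega), if_neg (by omega)]
      simp
    · have : n = 2 ∨ n = 3 ∨ n = 4 := by omega
      rcases this with h | h | h <;> subst h <;> decide

-- ===== VERDICT (by name: the statement is the Claim_ definition above) =====
theorem solution_spec : Claim_equal_solution := by
  intro n _
  unfold Spec_solution
  exact main_eq n
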